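-- pv_equiv track=rewrite | github.com/CDL-Project-Euler/solutions | problems26-50/problem_0048/inle_48.py | self_powers
-- ===== SOURCE A (Python) =====
-- def self_powers(final:int):
--     sum_pows = 0
--     for integer in range(1, final + 1):
--         power = 1
--         for _ in range(integer):
--             power = (power * integer) % (10**11)
--         sum_pows += power
--     return sum_pows % (10 ** 10)
-- ===== SOURCE B (Python) =====
-- def self_powers(final: int):
--     M = 10 ** 11
--     return sum(pow(i, i, M) for i in range(1, final + 1)) % (10 ** 10)
-- ===== Notes on version B (the rewrite author's own statement) =====
-- stated objective: faster
-- what changed: Replaces A's inner repeated-multiplication loop (i multiplications per term) with built-in three-argument pow, i.e. binary modular exponentiation, summed in one pass.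
import Mathlib
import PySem

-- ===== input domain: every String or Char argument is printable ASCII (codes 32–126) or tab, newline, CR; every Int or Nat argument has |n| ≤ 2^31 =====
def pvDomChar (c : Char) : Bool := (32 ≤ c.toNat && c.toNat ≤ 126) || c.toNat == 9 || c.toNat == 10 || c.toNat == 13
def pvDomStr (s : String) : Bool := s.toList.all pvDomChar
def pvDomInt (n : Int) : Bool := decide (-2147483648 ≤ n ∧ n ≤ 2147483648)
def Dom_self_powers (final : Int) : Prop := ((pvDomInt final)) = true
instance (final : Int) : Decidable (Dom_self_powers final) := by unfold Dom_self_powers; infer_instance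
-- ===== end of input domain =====

-- B replaces A's inner O(i) repeated-multiplication loop with binary modular exponentiation (Python's 3-arg pow): asymptotically faster.


-- ===== PORT A =====
def self_powers (final : Int) : Int :=
  ((PySem.List.pyRange 1 (final + 1) 1).foldl
    (fun sum_pows integer =>
      sum_pows +
        (PySem.List.pyRange 0 integer 1).foldl
          (fun power _ => (power * integer) % (10 ^ 11)) 1)
    0) % (10 ^ 10)

-- ===== PORT B =====
-- port of Python's built-in pow(b, e, m): binary modular exponentiation
def pvPowMod (b : Int) (e : Nat) (m : Int) : Int :=
  if e = 0 then 1 % m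
  else
    let h := pvPowMod b (e / 2) m
    if e % 2 = 0 then (h * h) % m else ((h * h) % m * b) % m

def self_powers_alt (final : Int) : Int :=
  ((PySem.List.pyRange 1 (final + 1) 1).foldl
    (fun s i => s + pvPowMod i i.toNat (10 ^ 11)) 0) % (10 ^ 10)

-- ===== PRECONDITION & SPEC =====
def Spec_self_powers (final : Int) (out : Int) : Prop := out = self_powers_alt final
instance (final : Int) (out : Int) : Decidable (Spec_self_powers final out) := by unfold Spec_self_powers; infer_instance

-- ===== CLAIM (what is proved, stated in full; the proofs are below) =====
def Claim_equal_self_powers : Prop := ∀ (final : Int), Dom_self_powers final → Spec_self_powers final (self_powers final)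

-- ===== LEMMAS AND PROOFS =====

theorem pvPowMod_eq (b : Int) (m : Int) : ∀ e : Nat, pvPowMod b e m = b ^ e % m := by
  intro e
  induction e using Nat.strong_induction_on with
  | _ e ih =>
    rw [pvPowMod]
    by_cases h0 : e = 0
    · simp [h0]
    · have hlt : e / 2 < e := Nat.div_lt_self (Nat.pos_of_ne_zero h0) (by omega)
      rw [if_neg h0, ih _ hlt]
      by_cases hpar : e % 2 = 0
      · rw [if_pos hpar, ← Int.mul_emod, ← pow_add]
        congr 2
        omega
      · rw [if_neg hpar]
        rw [← Int.mul_emod, ← pow_add, Int.mul_emod, Int.emod_emod_of_dvd _ (dvd_refl m),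
            ← Int.mul_emod, ← pow_succ]
        congr 2
        omega

theorem inner_fold (i m : Int) :
    ∀ (l : List Int) (p : Int),
      l.foldl (fun power _ => (power * i) % m) p =
        if l.isEmpty then p else (p * i ^ l.length) % m := by
  intro l
  induction l with
  | nil => intro p; simp
  | cons a l ih =>
    intro p
    rw [List.foldl_cons, ih ((p * i) % m)]
    by_cases hl : l.isEmpty
    · have h0 : l = [] := List.isEmpty_iff.mp hl
      subst h0
      simp
    · rw [if_neg (by simpa using hl)]
      simp only [List.isEmpty_cons, List.length_cons, Bool.false_eq_true, if_false]
      rw [Int.mul_emod, Int.emod_emod_of_dvd _ (dvd_refl m), ← Int.mul_emod,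
          mul_assoc, ← pow_succ']

-- ===== VERDICT (by name: the statement is the Claim_ definition above) =====
theorem self_powers_spec : Claim_equal_self_powers := by
  intro final _
  unfold Spec_self_powers self_powers self_powers_alt
  congr 1
  apply PySem.List.foldl_congr_mem
  intro acc x hx
  have hx1 : 1 ≤ x ∧ x < final + 1 := (PySem.List.mem_pyRange_one.mp hx)
  congr 1
  have hlen : (PySem.List.pyRange 0 x 1).length = x.toNat := by
    rw [PySem.List.length_pyRange_one]; omega
  have hne : (PySem.List.pyRange 0 x 1).isEmpty = false := by
    cases h : (PySem.List.pyRange 0 x 1).isEmpty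
    · rfl
    · exfalso
      rw [List.isEmpty_iff_length_eq_zero, hlen] at h
      omega
  rw [inner_fold, hne, if_neg (by simp), hlen, one_mul, pvPowMod_eq]
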